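-- pv_equiv track=rewrite | github.com/jaehanbyun/leetcode | easy/3477_Fruits_Into_Baskets_II.py | numOfUnplacedFruits
-- ===== SOURCE A (Python) =====
-- from typing import List
--
-- def numOfUnplacedFruits(fruits: List[int], baskets: List[int]) -> int:
--     remainFruitTypes= 0
--
--     for numFruits in fruits:
--         for i in range(len(baskets)):
--             if numFruits <= baskets[i]:
--                 baskets[i] = 0
--                 break
--
--     remainFruitTypes = len(baskets) - baskets.count(0)
--
--     return remainFruitTypes
-- ===== SOURCE B (Python) =====
-- from typing import List
--
-- def numOfUnplacedFruits(fruits: List[int], baskets: List[int]) -> int: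
--     # Max segment tree over current basket values; each fruit takes the leftmost
--     # basket whose current value is >= the fruit (taken baskets hold 0).
--     # Note: unlike A, this does not mutate `baskets` in place.
--     if not baskets:
--         return 0
--
--     def build(xs):
--         if len(xs) == 1:
--             return [xs[0]]
--         m = len(xs) // 2
--         l, r = build(xs[:m]), build(xs[m:])
--         return [max(l[0], r[0]), l, r]
--
--     def place(t, f):
--         if t[0] < f:
--             return False
--         if len(t) == 1:
--             t[0] = 0
--         else:
--             if not place(t[1], f):
--                 place(t[2], f)
--             t[0] = max(t[1][0], t[2][0])
--         return True
--
--     def count_nonzero(t):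
--         if len(t) == 1:
--             return 1 if t[0] != 0 else 0
--         return count_nonzero(t[1]) + count_nonzero(t[2])
--
--     tree = build(baskets)
--     for f in fruits:
--         place(tree, f)
--     return count_nonzero(tree)
-- ===== Notes on version B (the rewrite author's own statement) =====
-- stated objective: alternative
-- what changed: Replaces A's per-fruit linear scan of all baskets with a max segment tree over current basket values, descending to the leftmost basket whose value is >= the fruit and zeroing that leaf; the answer is the count of nonzero leaves (B does not mutate the baskets list in place as A does).
import Mathlib
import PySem

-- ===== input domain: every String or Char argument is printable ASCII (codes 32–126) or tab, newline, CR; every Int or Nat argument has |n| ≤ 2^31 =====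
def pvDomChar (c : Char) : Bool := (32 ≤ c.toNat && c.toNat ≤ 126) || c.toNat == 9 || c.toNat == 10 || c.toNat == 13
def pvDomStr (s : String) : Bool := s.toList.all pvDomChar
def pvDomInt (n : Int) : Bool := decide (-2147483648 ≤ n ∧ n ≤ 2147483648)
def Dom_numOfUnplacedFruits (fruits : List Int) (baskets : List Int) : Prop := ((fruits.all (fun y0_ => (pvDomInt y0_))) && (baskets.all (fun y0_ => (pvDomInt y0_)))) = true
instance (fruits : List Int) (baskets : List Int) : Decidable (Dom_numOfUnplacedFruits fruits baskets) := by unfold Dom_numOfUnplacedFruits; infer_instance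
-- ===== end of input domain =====

-- B uses a different algorithm (a max segment tree, each fruit taking the leftmost basket whose
-- current value is ≥ the fruit); A mutates `baskets` in place (zeroing used entries) — the
-- equivalence proved is about the return value only.

-- ===== PORT A =====
-- A's inner loop: scan baskets left to right, zero the first entry ≥ fruit, break.
def placeLoopA : List Int → Int → List Int
  | [], _ => []
  | b :: rest, f => if f ≤ b then 0 :: rest else b :: placeLoopA rest f

def numOfUnplacedFruits (fruits : List Int) (baskets : List Int) : Int :=
  let final := fruits.foldl (fun bs f => placeLoopA bs f) baskets
  (final.length : Int) - PySem.List.count final 0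

-- ===== PORT B =====
inductive Seg where
  | leaf (v : Int)
  | node (mx : Int) (l r : Seg)
deriving Repr

def Seg.top : Seg → Int
  | .leaf v => v
  | .node mx _ _ => mx

def buildSeg : List Int → Seg
  | [] => .leaf 0          -- unreachable: B returns early on empty baskets
  | [b] => .leaf b
  | b1 :: b2 :: rest =>
    let bs := b1 :: b2 :: rest
    let m := bs.length / 2
    let l := buildSeg (bs.take m)
    let r := buildSeg (bs.drop m)
    .node (max l.top r.top) l r
termination_by bs => bs.length
decreasing_by
  · simp; omega
  · simp; omega

def placeSeg : Seg → Int → Seg × Bool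
  | .leaf v, f => if v < f then (.leaf v, false) else (.leaf 0, true)
  | .node mx l r, f =>
    if mx < f then (.node mx l r, false)
    else
      let lp := placeSeg l f
      let r' := if lp.2 then r else (placeSeg r f).1
      (.node (max lp.1.top r'.top) lp.1 r', true)

def countNonzeroSeg : Seg → Int
  | .leaf v => if v ≠ 0 then 1 else 0
  | .node _ l r => countNonzeroSeg l + countNonzeroSeg r

def numOfUnplacedFruits_alt (fruits : List Int) (baskets : List Int) : Int :=
  if baskets = [] then 0
  else countNonzeroSeg (fruits.foldl (fun t f => (placeSeg t f).1) (buildSeg baskets))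

-- ===== PRECONDITION & SPEC =====
def Spec_numOfUnplacedFruits (fruits : List Int) (baskets : List Int) (out : Int) : Prop := out = numOfUnplacedFruits_alt fruits baskets
instance (fruits : List Int) (baskets : List Int) (out : Int) : Decidable (Spec_numOfUnplacedFruits fruits baskets out) := by unfold Spec_numOfUnplacedFruits; infer_instance

-- ===== CLAIM (what is proved, stated in full; the proofs are below) =====
def Claim_equal_numOfUnplacedFruits : Prop := ∀ (fruits : List Int) (baskets : List Int), Dom_numOfUnplacedFruits fruits baskets → Spec_numOfUnplacedFruits fruits baskets (numOfUnplacedFruits fruits baskets)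

-- ===== LEMMAS AND PROOFS =====

def Seg.leaves : Seg → List Int
  | .leaf v => [v]
  | .node _ l r => l.leaves ++ r.leaves

def SegValid : Seg → Prop
  | .leaf _ => True
  | .node mx l r => SegValid l ∧ SegValid r ∧ mx = max l.top r.top

@[simp] theorem seg_top_leaf (v : Int) : (Seg.leaf v).top = v := rfl
@[simp] theorem seg_top_node (mx : Int) (l r : Seg) : (Seg.node mx l r).top = mx := rfl
@[simp] theorem seg_leaves_leaf (v : Int) : (Seg.leaf v).leaves = [v] := rfl
@[simp] theorem seg_leaves_node (mx : Int) (l r : Seg) :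
    (Seg.node mx l r).leaves = l.leaves ++ r.leaves := rfl
@[simp] theorem segValid_leaf (v : Int) : SegValid (Seg.leaf v) := trivial
@[simp] theorem segValid_node (mx : Int) (l r : Seg) :
    SegValid (Seg.node mx l r) ↔ SegValid l ∧ SegValid r ∧ mx = max l.top r.top := Iff.rfl

theorem placeSeg_leaf (v f : Int) :
    placeSeg (Seg.leaf v) f = if v < f then (Seg.leaf v, false) else (Seg.leaf 0, true) := rfl

theorem placeSeg_node (mx f : Int) (l r : Seg) :
    placeSeg (Seg.node mx l r) f =
      if mx < f then (Seg.node mx l r, false)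
      else
        let lp := placeSeg l f
        let r' := if lp.2 then r else (placeSeg r f).1
        (Seg.node (max lp.1.top r'.top) lp.1 r', true) := rfl

theorem top_spec (t : Seg) (h : SegValid t) (f : Int) :
    f ≤ t.top ↔ ∃ x ∈ t.leaves, f ≤ x := by
  induction t with
  | leaf v => simp
  | node mx l r ihl ihr =>
    obtain ⟨hl, hr, hm⟩ := h
    rw [seg_top_node, hm, le_max_iff, ihl hl, ihr hr]
    simp [or_and_right, exists_or]

theorem placeA_id (xs : List Int) (f : Int) (h : ∀ x ∈ xs, x < f) :
    placeLoopA xs f = xs := by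
  induction xs with
  | nil => rfl
  | cons b rest ih =>
    have := h b (by simp)
    simp [placeLoopA, not_le.mpr this, ih (fun x hx => h x (by simp [hx]))]

theorem placeA_append_left (xs ys : List Int) (f : Int) (h : ∃ x ∈ xs, f ≤ x) :
    placeLoopA (xs ++ ys) f = placeLoopA xs f ++ ys := by
  induction xs with
  | nil => simp at h
  | cons b rest ih =>
    by_cases hb : f ≤ b
    · simp [placeLoopA, hb]
    · have hrest : ∃ x ∈ rest, f ≤ x := by
        obtain ⟨x, hx, hfx⟩ := h
        rcases List.mem_cons.mp hx with rfl | hx'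
        · exact absurd hfx hb
        · exact ⟨x, hx', hfx⟩
      simp [placeLoopA, hb, ih hrest]

theorem placeA_append_right (xs ys : List Int) (f : Int) (h : ∀ x ∈ xs, x < f) :
    placeLoopA (xs ++ ys) f = xs ++ placeLoopA ys f := by
  induction xs with
  | nil => rfl
  | cons b rest ih =>
    have := h b (by simp)
    simp [placeLoopA, not_le.mpr this, ih (fun x hx => h x (by simp [hx]))]

theorem placeSeg_fail (t : Seg) (f : Int) (h : (placeSeg t f).2 = false) :
    (placeSeg t f).1 = t := by
  cases t with
  | leaf v =>
    rw [placeSeg_leaf] at h ⊢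
    by_cases hv : v < f
    · simp [hv]
    · simp [hv] at h
  | node mx l r =>
    rw [placeSeg_node] at h ⊢
    by_cases hmx : mx < f
    · simp [hmx]
    · simp [hmx] at h

theorem placeSeg_spec (t : Seg) (f : Int) (h : SegValid t) :
    SegValid (placeSeg t f).1 ∧ (placeSeg t f).1.leaves = placeLoopA t.leaves f ∧
      ((placeSeg t f).2 = true ↔ f ≤ t.top) := by
  induction t with
  | leaf v =>
    rw [placeSeg_leaf]
    by_cases hv : v < f
    · simp [hv, placeLoopA, not_le.mpr hv]
    · simp [hv, placeLoopA, not_lt.mp hv]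
  | node mx l r ihl ihr =>
    obtain ⟨hl, hr, hm⟩ := h
    obtain ⟨ivl, iel, ibl⟩ := ihl hl
    obtain ⟨ivr, ier, ibr⟩ := ihr hr
    rw [placeSeg_node]
    by_cases hmx : mx < f
    · have hall : ∀ x ∈ (Seg.node mx l r).leaves, x < f := by
        intro x hx
        have hx' : x ≤ (Seg.node mx l r).top :=
          (top_spec _ ((segValid_node _ _ _).mpr ⟨hl, hr, hm⟩) x).mpr ⟨x, hx, le_refl x⟩
        exact lt_of_le_of_lt hx' hmx
      rw [if_pos hmx]
      exact ⟨(segValid_node _ _ _).mpr ⟨hl, hr, hm⟩,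
         (placeA_id _ _ hall).symm,
        by simp [not_le.mpr hmx]⟩
    · rw [if_neg hmx]
      by_cases hok : (placeSeg l f).2 = true
      · have hfl : f ≤ l.top := ibl.mp hok
        have hex : ∃ x ∈ l.leaves, f ≤ x := (top_spec l hl f).mp hfl
        simp only [hok, if_true]
        exact ⟨(segValid_node _ _ _).mpr ⟨ivl, hr, rfl⟩,
          by simp [placeA_append_left _ _ _ hex, iel],
          by simp [not_lt.mp hmx]⟩
      · have hok' : (placeSeg l f).2 = false := by
          cases hb : (placeSeg l f).2
          · rfl
          · exact absurd hb hok
        have hlid : (placeSeg l f).1 = l := placeSeg_fail l f hok'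
        have hnl : ¬ f ≤ l.top := fun hc => hok (ibl.mpr hc)
        have hall : ∀ x ∈ l.leaves, x < f := by
          intro x hx
          by_contra hc
          exact hnl ((top_spec l hl f).mpr ⟨x, hx, not_lt.mp hc⟩)
        simp only [hok', Bool.false_eq_true, if_false]
        exact ⟨(segValid_node _ _ _).mpr ⟨ivl, ivr, rfl⟩,
          by simp [hlid, placeA_append_right _ _ _ hall, ier],
          by simp [not_lt.mp hmx]⟩

theorem buildSeg_spec (bs0 : List Int) (h : bs0 ≠ []) :
    SegValid (buildSeg bs0) ∧ (buildSeg bs0).leaves = bs0 := by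
  fun_induction buildSeg bs0 with
  | case1 => simp at h
  | case2 b => simp
  | case3 b1 b2 rest bs m l r ihl ihr =>
    simp only [bs, m, l, r] at *
    have htk : (b1 :: b2 :: rest).take ((b1 :: b2 :: rest).length / 2) ≠ [] := by
      intro hc
      have := congrArg List.length hc
      simp only [List.length_take, List.length_nil] at this
      simp at this
    have hdr : (b1 :: b2 :: rest).drop ((b1 :: b2 :: rest).length / 2) ≠ [] := by
      intro hc
      have := congrArg List.length hc
      simp only [List.length_drop, List.length_nil] at this
      simp at this; omega
    obtain ⟨vl, el⟩ := ihl htk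
    obtain ⟨vr, er⟩ := ihr hdr
    refine ⟨(segValid_node _ _ _).mpr ⟨vl, vr, rfl⟩, ?_⟩
    rw [seg_leaves_node, el, er, List.take_append_drop]

theorem fold_nil (fruits : List Int) :
    fruits.foldl (fun bs f => placeLoopA bs f) [] = [] := by
  induction fruits with
  | nil => rfl
  | cons f fs ih => simpa [placeLoopA] using ih

theorem fold_spec (fruits : List Int) (t : Seg) (h : SegValid t) :
    SegValid (fruits.foldl (fun t f => (placeSeg t f).1) t) ∧
      (fruits.foldl (fun t f => (placeSeg t f).1) t).leaves =
        fruits.foldl (fun bs f => placeLoopA bs f) t.leaves := by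
  induction fruits generalizing t with
  | nil => exact ⟨h, rfl⟩
  | cons f fs ih =>
    obtain ⟨hv, he, _⟩ := placeSeg_spec t f h
    obtain ⟨hv', he'⟩ := ih _ hv
    exact ⟨hv', by simp only [List.foldl_cons, he', he]⟩

theorem countNonzero_leaves (t : Seg) :
    countNonzeroSeg t = ((t.leaves.filter (fun x => !(x == 0))).length : Int) := by
  induction t with
  | leaf v => by_cases hv : v = 0 <;> simp [countNonzeroSeg, hv]
  | node mx l r ihl ihr => simp [countNonzeroSeg, ihl, ihr]

theorem length_sub_count (xs : List Int) :
    (xs.length : Int) - PySem.List.count xs 0 = ((xs.filter (fun x => !(x == 0))).length : Int) := by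
  induction xs with
  | nil => simp [PySem.List.count]
  | cons x rest ih =>
    by_cases hx : x = 0 <;>
      simp [PySem.List.count, hx] at * <;> omega

-- ===== VERDICT (by name: the statement is the Claim_ definition above) =====
theorem numOfUnplacedFruits_spec : Claim_equal_numOfUnplacedFruits := by
  intro fruits baskets _
  unfold Spec_numOfUnplacedFruits numOfUnplacedFruits numOfUnplacedFruits_alt
  by_cases hb : baskets = []
  · subst hb
    simp [fold_nil, PySem.List.count]
  · simp only [if_neg hb]
    obtain ⟨hv, he⟩ := buildSeg_spec baskets hb
    obtain ⟨_, hfe⟩ := fold_spec fruits _ hv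
    rw [countNonzero_leaves, hfe, he, length_sub_count]
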